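-- pv_equiv track=rewrite | github.com/pypi-data/pypi-mirror-246 | packages/SongNameSplit/SongNameSplit-2.2.4.tar.gz/SongNameSplit-2.2.4/SongNameSplit/mainsplit.py | namesplit
-- ===== SOURCE A (Python) =====
-- def namesplit(inputName):
--     fname = list(inputName)
--     songname = ''
--     hyphc = 0
--     for i in range(len(fname)):
--         if fname[i] == '(' or fname[i] == '{' or fname[i] == '|' or fname[i] == '[':
--             break
--         if fname[i] == '-':
--             hyphc += 1
--         if fname[i] == '-' and hyphc == 2:
--             break
--         songname += str(fname[i])
--
--     return songname
-- ===== SOURCE B (Python) =====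
-- def namesplit(inputName):
--     n = len(inputName)
--     delims = [i for i, c in enumerate(inputName) if c in '({|[']
--     hyphens = [i for i, c in enumerate(inputName) if c == '-']
--     delim = delims[0] if delims else n
--     hyph = hyphens[1] if len(hyphens) >= 2 else n
--     return inputName[:min(delim, hyph)]
-- ===== Notes on version B (the rewrite author's own statement) =====
-- stated objective: simpler
-- what changed: Replaces the char-by-char accumulator loop with hyphen counter and break by a locate-then-slice strategy: collect delimiter and hyphen index lists with comprehensions, take the first delimiter and second hyphen (len if absent), and slice once at their minimum.
import Mathlib
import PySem

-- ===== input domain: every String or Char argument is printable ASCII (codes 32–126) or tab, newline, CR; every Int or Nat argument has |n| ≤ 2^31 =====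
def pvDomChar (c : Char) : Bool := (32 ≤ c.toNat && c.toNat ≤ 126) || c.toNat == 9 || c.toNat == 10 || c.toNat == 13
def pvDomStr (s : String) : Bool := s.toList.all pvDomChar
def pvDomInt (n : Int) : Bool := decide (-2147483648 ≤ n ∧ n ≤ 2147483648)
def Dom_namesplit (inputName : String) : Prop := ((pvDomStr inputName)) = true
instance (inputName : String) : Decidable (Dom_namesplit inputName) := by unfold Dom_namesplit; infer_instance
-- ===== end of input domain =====

-- B locates the boundaries (first delimiter, second hyphen) with index comprehensions and slices once,
-- instead of A's char-by-char accumulator loop with a hyphen counter and break; objective: simpler.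

-- ===== PORT A =====
-- the for-loop over fname with its break conditions, accumulating songname; hyphc is the loop state
def namesplitLoop : List Char → Int → List Char
  | [], _ => []
  | c :: rest, hyphc =>
    if c = '(' ∨ c = '{' ∨ c = '|' ∨ c = '[' then []
    else
      let hyphc' := if c = '-' then hyphc + 1 else hyphc
      if c = '-' ∧ hyphc' = 2 then []
      else c :: namesplitLoop rest hyphc'

def namesplit (inputName : String) : String :=
  String.ofList (namesplitLoop inputName.toList 0)

-- ===== PORT B =====
-- xs[0] if xs else d
def pyFirstD (xs : List Int) (d : Int) : Int :=
  match xs with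
  | [] => d
  | x :: _ => x

-- xs[1] if len(xs) >= 2 else d
def pySecondD (xs : List Int) (d : Int) : Int :=
  match xs with
  | _ :: x :: _ => x
  | _ => d

def namesplit_alt (inputName : String) : String :=
  let l := inputName.toList
  let n : Int := l.length
  let delims := (PySem.List.enumerate l 0).filterMap
    (fun p => if p.2 = '(' ∨ p.2 = '{' ∨ p.2 = '|' ∨ p.2 = '[' then some p.1 else none)
  let hyphens := (PySem.List.enumerate l 0).filterMap
    (fun p => if p.2 = '-' then some p.1 else none)
  let delim := pyFirstD delims n
  let hyph := pySecondD hyphens n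
  String.ofList (PySem.Chars.slice l none (some (min delim hyph)))

-- ===== PRECONDITION & SPEC =====
def Spec_namesplit (inputName : String) (out : String) : Prop := out = namesplit_alt inputName
instance (inputName : String) (out : String) : Decidable (Spec_namesplit inputName out) := by unfold Spec_namesplit; infer_instance

-- ===== CLAIM (what is proved, stated in full; the proofs are below) =====
def Claim_equal_namesplit : Prop := ∀ (inputName : String), Dom_namesplit inputName → Spec_namesplit inputName (namesplit inputName)

-- ===== LEMMAS AND PROOFS =====

-- index of the first delimiter ('(' '{' '|' '['), = length if none
def dIdx (l : List Char) : Nat :=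
  l.findIdx (fun c => c = '(' ∨ c = '{' ∨ c = '|' ∨ c = '[')

-- index of the second '-', = length if there are fewer than two
def sndH : List Char → Nat
  | [] => 0
  | c :: r => if c = '-' then 1 + r.findIdx (fun c => c = '-') else 1 + sndH r

lemma pyFirstD_filterMap (q : Char → Bool) :
    ∀ (l : List Char) (s : Int),
      pyFirstD ((PySem.List.enumerate l s).filterMap
        (fun p => if q p.2 then some p.1 else none)) (s + l.length)
      = s + (l.findIdx q : Int) := by
  intro l
  induction l with
  | nil => intro s; simp [PySem.List.enumerate, pyFirstD]
  | cons c r ih =>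
    intro s
    rw [PySem.List.enumerate_cons]
    by_cases hq : q c
    · simp [hq, pyFirstD, List.findIdx_cons]
    · have := ih (s + 1)
      simp only [List.filterMap_cons, hq, if_neg, List.findIdx_cons, cond_eq_ite,
        Bool.not_eq_true] at *
      simp at *
      rw [show s + (↑r.length + 1) = (s + 1) + ↑r.length by ring, this]
      ring

lemma pySecondD_filterMap :
    ∀ (l : List Char) (s : Int),
      pySecondD ((PySem.List.enumerate l s).filterMap
        (fun p => if p.2 = '-' then some p.1 else none)) (s + l.length)
      = s + (sndH l : Int) := by
  intro l
  induction l with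
  | nil => intro s; simp [PySem.List.enumerate, pySecondD, sndH]
  | cons c r ih =>
    intro s
    rw [PySem.List.enumerate_cons]
    by_cases hc : c = '-'
    · -- second element of (s :: hyphens of r) = first element of hyphens of r
      have h1 := pyFirstD_filterMap (fun c => c = '-') r (s + 1)
      simp only [decide_eq_true_eq] at h1
      simp only [List.filterMap_cons, hc, if_pos, sndH]
      have : pySecondD (s :: (PySem.List.enumerate r (s + 1)).filterMap
          (fun p => if p.2 = '-' then some p.1 else none)) (s + (↑r.length + 1))
          = pyFirstD ((PySem.List.enumerate r (s + 1)).filterMap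
          (fun p => if p.2 = '-' then some p.1 else none)) ((s + 1) + ↑r.length) := by
        cases hfm : (PySem.List.enumerate r (s + 1)).filterMap
          (fun p => if p.2 = '-' then some p.1 else none) with
        | nil => simp only [pySecondD, pyFirstD]; ring
        | cons a t => simp [pySecondD, pyFirstD]
      simp only [List.length_cons]
      push_cast
      rw [this]
      rw [h1]
      ring
    · have := ih (s + 1)
      simp only [List.filterMap_cons, hc, sndH]
      simp [hc] at *
      rw [show s + (↑r.length + 1) = (s + 1) + ↑r.length by ring, this]
      ring

def fstH (l : List Char) : Nat := l.findIdx (fun c => c = '-')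

lemma dIdx_cons (c : Char) (r : List Char) :
    dIdx (c :: r) = if c = '(' ∨ c = '{' ∨ c = '|' ∨ c = '[' then 0 else dIdx r + 1 := by
  by_cases h : c = '(' ∨ c = '{' ∨ c = '|' ∨ c = '[' <;>
    · first
      | (rw [if_pos h]; rcases h with h | h | h | h <;> simp [dIdx, List.findIdx_cons, h])
      | (rw [if_neg h]; push Not at h
         simp [dIdx, List.findIdx_cons, h.1, h.2.1, h.2.2.1, h.2.2.2])

lemma fstH_cons (c : Char) (r : List Char) :
    fstH (c :: r) = if c = '-' then 0 else fstH r + 1 := by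
  by_cases h : c = '-' <;> simp [fstH, List.findIdx_cons, h]

lemma namesplitLoop_one (l : List Char) :
    namesplitLoop l 1 = l.take (min (dIdx l) (fstH l)) := by
  induction l with
  | nil => simp [namesplitLoop]
  | cons c r ih =>
    rw [dIdx_cons, fstH_cons]
    by_cases hd : c = '(' ∨ c = '{' ∨ c = '|' ∨ c = '['
    · simp [namesplitLoop, hd]
    · rw [if_neg hd]
      by_cases hc : c = '-'
      · simp [namesplitLoop, hc]
      · rw [if_neg hc]
        rw [show min (dIdx r + 1) (fstH r + 1) = min (dIdx r) (fstH r) + 1 from by omega,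
          List.take_succ_cons]
        simp only [namesplitLoop, hd, hc, false_and, ite_false]
        rw [ih]

lemma namesplitLoop_zero (l : List Char) :
    namesplitLoop l 0 = l.take (min (dIdx l) (sndH l)) := by
  induction l with
  | nil => simp [namesplitLoop]
  | cons c r ih =>
    rw [dIdx_cons]
    by_cases hd : c = '(' ∨ c = '{' ∨ c = '|' ∨ c = '['
    · simp [namesplitLoop, hd]
    · rw [if_neg hd]
      by_cases hc : c = '-'
      · have hs : sndH (c :: r) = 1 + fstH r := by simp [sndH, hc, fstH]
        rw [hs, show min (dIdx r + 1) (1 + fstH r) = min (dIdx r) (fstH r) + 1 from by omega,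
          List.take_succ_cons]
        simp only [namesplitLoop, hc, true_and]
        norm_num
        rw [if_neg (by decide : ¬('-' = '(' ∨ '-' = '{' ∨ '-' = '|' ∨ '-' = '[')),
          namesplitLoop_one]
      · have hs : sndH (c :: r) = 1 + sndH r := by simp [sndH, hc]
        rw [hs, show min (dIdx r + 1) (1 + sndH r) = min (dIdx r) (sndH r) + 1 from by omega,
          List.take_succ_cons]
        simp only [namesplitLoop, hd, hc, false_and, ite_false]
        rw [ih]

-- ===== VERDICT (by name: the statement is the Claim_ definition above) =====
theorem namesplit_spec : Claim_equal_namesplit := by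
  intro s _
  unfold Spec_namesplit namesplit namesplit_alt
  set l := s.toList with hl
  have hfst := pyFirstD_filterMap (fun c => c = '(' ∨ c = '{' ∨ c = '|' ∨ c = '[') l 0
  have hsnd := pySecondD_filterMap l 0
  simp only [zero_add] at hfst hsnd
  simp only [decide_eq_true_eq] at hfst
  simp only []
  rw [hfst, hsnd]
  rw [show (min ((l.findIdx fun c => decide (c = '(' ∨ c = '{' ∨ c = '|' ∨ c = '[')) : Int) ((sndH l : Nat) : Int))
      = ((min (dIdx l) (sndH l) : Nat) : Int) by unfold dIdx; push_cast; ring]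
  rw [namesplitLoop_zero]
  congr 1
  simp [pysem]
  omega
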